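-- pv_equiv track=rewrite | github.com/shogo314/ac-library-mojo | analysis.py | to_oneline
-- ===== SOURCE A (Python) =====
-- def to_oneline(lines: list[str]):
--     br = {"}": "{", "]": "[", ")": "("}
--     br_cnt = {"{": 0, "[": 0, "(": 0}
--     res = [""]
--     for l in lines:
--         for c in l:
--             if c in br_cnt:
--                 br_cnt[c] += 1
--             if c in br:
--                 br_cnt[br[c]] -= 1
--         if res[-1]:
--             if res[-1].endswith(","):
--                 if l.strip().startswith(")") or l.strip().startswith("]"):
--                     res[-1] = res[-1][:-1]
--                 else:
--                     res[-1] = res[-1] + " "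
--             res[-1] += l.strip()
--         else:
--             res[-1] = l
--         if sum(br_cnt.values()) == 0:
--             res.append("")
--     if res[-1] == "":
--         res.pop()
--     return res
-- ===== SOURCE B (Python) =====
-- def to_oneline(lines: list[str]):
--     # Pass 1: cut the lines into groups at each point where the running
--     # bracket balance returns to zero; the tail after the last cut stays in `cur`.
--     def delta(l):
--         d = 0
--         for c in l:
--             if c in "{[(":
--                 d += 1
--             elif c in "}])":
--                 d -= 1
--         return d
--
--     groups = []
--     cur = []
--     bal = 0
--     for l in lines:
--         bal += delta(l)
--         cur.append(l)
--         if bal == 0: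
--             groups.append(cur)
--             cur = []
--
--     # Pass 2: merge each group into one line (first non-empty line verbatim,
--     # later lines stripped, comma-before-closer dropped, otherwise a space).
--     def merge(g):
--         acc = ""
--         for l in g:
--             if acc:
--                 s = l.strip()
--                 if acc.endswith(","):
--                     acc = acc[:-1] if (s.startswith(")") or s.startswith("]")) else acc + " "
--                 acc += s
--             else:
--                 acc = l
--         return acc
--
--     res = [merge(g) for g in groups]
--     tail = merge(cur)
--     if cur and tail:
--         res.append(tail)
--     return res
-- ===== Notes on version B (the rewrite author's own statement) =====
-- stated objective: simpler
-- what changed: Replaced A's single loop that mutates three per-bracket dict counters and edits res[-1] in place by two passes: first group the lines at the points where one integer bracket balance returns to zero, then merge each group independently with a fold, appending the unbalanced tail group only if it is nonempty.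
import Mathlib
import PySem

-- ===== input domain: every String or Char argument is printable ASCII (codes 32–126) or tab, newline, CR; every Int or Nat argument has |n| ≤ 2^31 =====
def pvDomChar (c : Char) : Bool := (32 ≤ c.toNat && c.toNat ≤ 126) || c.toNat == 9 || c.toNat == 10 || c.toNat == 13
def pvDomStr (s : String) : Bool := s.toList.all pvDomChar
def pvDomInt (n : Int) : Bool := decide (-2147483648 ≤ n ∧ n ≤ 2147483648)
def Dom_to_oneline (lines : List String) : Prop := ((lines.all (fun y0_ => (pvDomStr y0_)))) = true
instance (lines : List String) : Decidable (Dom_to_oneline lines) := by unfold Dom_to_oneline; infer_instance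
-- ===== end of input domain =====

-- B replaces A's single loop with mutable dict counters and res[-1] surgery by two
-- passes: group lines at the points where one integer bracket balance returns to
-- zero, then merge each group independently (objective: simpler decomposition).

-- shared tiny helpers (used by both ports)
-- s[:-1] on a string: drop the last character ("" stays ""); exact for Python s[:-1]
def pyInit (s : String) : String := String.ofList s.toList.dropLast

-- ===== PORT A =====
-- res[-1] (res is never empty in A, so the default is never used)
def pyLast (xs : List String) : String := (PySem.List.pyGet? xs (-1)).getD ""
-- res[-1] = s
def setLast (xs : List String) (s : String) : List String := xs.dropLast ++ [s]

-- Python dict literals with distinct keys: Dict.mk of the pair list is exact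
def brA : PySem.Dict Char Char := PySem.Dict.mk [('}', '{'), (']', '['), (')', '(')]
def cntInitA : PySem.Dict Char Int := PySem.Dict.mk [('{', 0), ('[', 0), ('(', 0)]

-- body of A's inner `for c in l`
def charStepA (d : PySem.Dict Char Int) (c : Char) : PySem.Dict Char Int :=
  let d1 := if d.contains c then d.modify c 0 (· + 1) else d
  if brA.contains c then d1.modify ((brA.get? c).getD ' ') 0 (· - 1) else d1

-- body of A's outer `for l in lines` (state: br_cnt, res)
def lineStepA (st : PySem.Dict Char Int × List String) (l : String) :
    PySem.Dict Char Int × List String :=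
  let cnt := l.toList.foldl charStepA st.1
  let res := st.2
  let res1 :=
    if pyLast res ≠ "" then
      let res2 :=
        if PySem.Str.endswith (pyLast res) "," then
          if PySem.Str.startswith (PySem.Str.strip l) ")"
              || PySem.Str.startswith (PySem.Str.strip l) "]" then
            setLast res (pyInit (pyLast res))
          else
            setLast res (pyLast res ++ " ")
        else res
      setLast res2 (pyLast res2 ++ PySem.Str.strip l)
    else setLast res l
  let res3 := if (PySem.Dict.values cnt).sum = 0 then res1 ++ [""] else res1
  (cnt, res3)

def to_oneline (lines : List String) : List String :=
  let st := lines.foldl lineStepA (cntInitA, [""])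
  if pyLast st.2 = "" then st.2.dropLast else st.2

-- ===== PORT B =====
-- B's per-line bracket delta (body of its `for c in l`)
def charDeltaStep (d : Int) (c : Char) : Int :=
  if "{[(".toList.contains c then d + 1
  else if "}])".toList.contains c then d - 1
  else d

def lineDelta (l : String) : Int := l.toList.foldl charDeltaStep 0

-- body of B's `for l in g` inside merge
def mergeStep (acc l : String) : String :=
  if acc ≠ "" then
    let s := PySem.Str.strip l
    let acc1 :=
      if PySem.Str.endswith acc "," then
        if PySem.Str.startswith s ")" || PySem.Str.startswith s "]" then pyInit acc
        else acc ++ " "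
      else acc
    acc1 ++ s
  else l

def mergeG (g : List String) : String := g.foldl mergeStep ""

-- body of B's grouping pass (state: groups, cur, bal)
def groupStepB (st : List (List String) × List String × Int) (l : String) :
    List (List String) × List String × Int :=
  let bal := st.2.2 + lineDelta l
  let cur := st.2.1 ++ [l]
  if bal = 0 then (st.1 ++ [cur], [], bal) else (st.1, cur, bal)

def to_oneline_alt (lines : List String) : List String :=
  let st := lines.foldl groupStepB ([], [], 0)
  let res := st.1.map mergeG
  let tail := mergeG st.2.1
  if st.2.1 ≠ [] ∧ tail ≠ "" then res ++ [tail] else res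

-- ===== PRECONDITION & SPEC =====
def Spec_to_oneline (lines : List String) (out : List String) : Prop := out = to_oneline_alt lines
instance (lines : List String) (out : List String) : Decidable (Spec_to_oneline lines out) := by unfold Spec_to_oneline; infer_instance

-- ===== CLAIM (what is proved, stated in full; the proofs are below) =====
def Claim_equal_to_oneline : Prop := ∀ (lines : List String), Dom_to_oneline lines → Spec_to_oneline lines (to_oneline lines)

-- ===== LEMMAS AND PROOFS =====

-- A's counter dict always has exactly the three keys '{', '[', '(' in this order
def d3 (a b c : Int) : PySem.Dict Char Int := PySem.Dict.mk [('{', a), ('[', b), ('(', c)]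

theorem pyLast_append (X : List String) (m : String) : pyLast (X ++ [m]) = m := by
  simp [pyLast, PySem.List.pyGet?, PySem.List.pyIdx?]

theorem setLast_append (X : List String) (m s : String) : setLast (X ++ [m]) s = X ++ [s] := by
  simp [setLast]

theorem res_update (X : List String) (m l : String) :
    (if pyLast (X ++ [m]) ≠ "" then
      let res2 :=
        if PySem.Str.endswith (pyLast (X ++ [m])) "," then
          if PySem.Str.startswith (PySem.Str.strip l) ")"
              || PySem.Str.startswith (PySem.Str.strip l) "]" then
            setLast (X ++ [m]) (pyInit (pyLast (X ++ [m])))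
          else
            setLast (X ++ [m]) (pyLast (X ++ [m]) ++ " ")
        else X ++ [m]
      setLast res2 (pyLast res2 ++ PySem.Str.strip l)
    else setLast (X ++ [m]) l) = X ++ [mergeStep m l] := by
  rw [pyLast_append]
  by_cases hm : m = ""
  · simp [hm, mergeStep, setLast_append]
  · simp only [hm, if_pos, ne_eq, not_false_eq_true, mergeStep]
    split_ifs <;> simp [setLast_append, pyLast_append]

theorem charStepA_d3 (a b c : Int) (ch : Char) :
    ∃ a' b' c', charStepA (d3 a b c) ch = d3 a' b' c' ∧
      a' + b' + c' = charDeltaStep (a + b + c) ch := by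
  by_cases h1 : ch = '{'
  · exact ⟨a + 1, b, c, by subst h1; rfl, by subst h1; simp [charDeltaStep]; ring⟩
  by_cases h2 : ch = '['
  · exact ⟨a, b + 1, c, by subst h2; rfl, by subst h2; simp [charDeltaStep]; ring⟩
  by_cases h3 : ch = '('
  · exact ⟨a, b, c + 1, by subst h3; rfl, by subst h3; simp [charDeltaStep]; ring⟩
  by_cases h4 : ch = '}'
  · exact ⟨a - 1, b, c, by subst h4; rfl, by subst h4; simp [charDeltaStep]; ring⟩
  by_cases h5 : ch = ']'
  · exact ⟨a, b - 1, c, by subst h5; rfl, by subst h5; simp [charDeltaStep]; ring⟩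
  by_cases h6 : ch = ')'
  · exact ⟨a, b, c - 1, by subst h6; rfl, by subst h6; simp [charDeltaStep]; ring⟩
  · refine ⟨a, b, c, ?_, ?_⟩
    · simp [charStepA, d3, brA, PySem.Dict.contains, Ne.symm h1, Ne.symm h2,
        Ne.symm h3, Ne.symm h4, Ne.symm h5, Ne.symm h6]
    · simp [charDeltaStep, h1, h2, h3, h4, h5, h6]

theorem dictFold (cs : List Char) (a b c : Int) :
    ∃ a' b' c', cs.foldl charStepA (d3 a b c) = d3 a' b' c' ∧
      a' + b' + c' = cs.foldl charDeltaStep (a + b + c) := by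
  induction cs generalizing a b c with
  | nil => exact ⟨a, b, c, rfl, rfl⟩
  | cons ch t ih =>
    obtain ⟨a1, b1, c1, hd, hs⟩ := charStepA_d3 a b c ch
    obtain ⟨a', b', c', hd', hs'⟩ := ih a1 b1 c1
    refine ⟨a', b', c', ?_, ?_⟩
    · rw [List.foldl_cons, hd, hd']
    · rw [List.foldl_cons, ← hs, hs']

theorem charDeltaStep_shift (cs : List Char) (x : Int) :
    cs.foldl charDeltaStep x = x + cs.foldl charDeltaStep 0 := by
  induction cs generalizing x with
  | nil => simp
  | cons c t ih =>
    rw [List.foldl_cons, List.foldl_cons, ih, ih (charDeltaStep 0 c)]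
    simp only [charDeltaStep]
    split_ifs <;> ring

theorem mergeG_concat (g : List String) (l : String) :
    mergeG (g ++ [l]) = mergeStep (mergeG g) l := by
  simp [mergeG]

theorem values_d3_sum (a b c : Int) : (PySem.Dict.values (d3 a b c)).sum = a + b + c := by
  simp [d3, PySem.Dict.values]; ring

theorem lineStepA_eq (a b c : Int) (gs : List (List String)) (cur : List String) (l : String) :
    ∃ a' b' c', a' + b' + c' = a + b + c + lineDelta l ∧
      lineStepA (d3 a b c, gs.map mergeG ++ [mergeG cur]) l =
        (d3 a' b' c',
          if a + b + c + lineDelta l = 0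
          then (gs ++ [cur ++ [l]]).map mergeG ++ [mergeG ([] : List String)]
          else gs.map mergeG ++ [mergeG (cur ++ [l])]) := by
  obtain ⟨a', b', c', hd, hs⟩ := dictFold l.toList a b c
  have hbal : a' + b' + c' = a + b + c + lineDelta l := by
    rw [hs, charDeltaStep_shift]; rfl
  refine ⟨a', b', c', hbal, ?_⟩
  simp only [lineStepA, hd, res_update, values_d3_sum, hbal, mergeG_concat]
  split_ifs with h0
  · simp [List.map_append, mergeG]
  · rfl

theorem main_inv (lines : List String) (a b c : Int) (gs : List (List String)) (cur : List String) :
    (lines.foldl lineStepA (d3 a b c, gs.map mergeG ++ [mergeG cur])).2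
      = (lines.foldl groupStepB (gs, cur, a + b + c)).1.map mergeG
        ++ [mergeG (lines.foldl groupStepB (gs, cur, a + b + c)).2.1] := by
  induction lines generalizing a b c gs cur with
  | nil => simp
  | cons l t ih =>
    obtain ⟨a', b', c', hbal, hstep⟩ := lineStepA_eq a b c gs cur l
    rw [List.foldl_cons, hstep, List.foldl_cons]
    have hg : groupStepB (gs, cur, a + b + c) l =
        if a + b + c + lineDelta l = 0
        then (gs ++ [cur ++ [l]], ([] : List String), a + b + c + lineDelta l)
        else (gs, cur ++ [l], a + b + c + lineDelta l) := by
      simp only [groupStepB]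
    rw [hg]
    split_ifs with h0
    · have := ih a' b' c' (gs ++ [cur ++ [l]]) []
      rwa [hbal] at this
    · have := ih a' b' c' gs (cur ++ [l])
      rwa [hbal] at this

-- ===== VERDICT (by name: the statement is the Claim_ definition above) =====
theorem to_oneline_spec : Claim_equal_to_oneline := by
  intro lines _
  show to_oneline lines = to_oneline_alt lines
  have h := main_inv lines 0 0 0 [] []
  have h0 : ((0 : Int) + 0 + 0) = 0 := by norm_num
  rw [h0] at h
  have hinit : (cntInitA, ([""] : List String)) =
      (d3 0 0 0, ([] : List (List String)).map mergeG ++ [mergeG ([] : List String)]) := rfl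
  simp only [to_oneline, to_oneline_alt, hinit, h]
  rw [pyLast_append]
  by_cases ht : mergeG (lines.foldl groupStepB ([], [], 0)).2.1 = ""
  · rw [if_pos ht, List.dropLast_concat]
    simp [ht]
  · rw [if_neg ht]
    have hc : (lines.foldl groupStepB ([], [], 0)).2.1 ≠ [] := by
      intro he
      exact ht (by rw [he]; rfl)
    rw [if_pos ⟨hc, ht⟩]
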